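-- pv_equiv track=rewrite | github.com/Renu-code123/Codedex-Coding-challenge-March- | Day17-Cherry Blossoms 🌸/solution.py | cherry_blossoms
-- ===== SOURCE A (Python) =====
-- def cherry_blossoms(temps):
--     n = len(temps)
--
--     # If less than 5 days → impossible
--     if n < 5:
--         return -1
--
--     # Initial window sum (first 5 days)
--     window_sum = sum(temps[:5])
--
--     # Check first window
--     if window_sum / 5 > 15:
--         return 5  # day number (1-indexed)
--
--     # Slide the window
--     for i in range(5, n):
--         window_sum += temps[i]      # add next day
--         window_sum -= temps[i - 5]  # remove old day
--
--         if window_sum / 5 > 15: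
--             return i + 1  # 1-indexed day
--
--     return -1
-- ===== SOURCE B (Python) =====
-- def cherry_blossoms(temps):
--     n = len(temps)
--     if n < 5:
--         return -1
--     for end in range(4, n):
--         # integer temps: sum/5 > 15 iff sum > 75 (exact)
--         if sum(temps[end - 4:end + 1]) > 75:
--             return end + 1
--     return -1
-- ===== Notes on version B (the rewrite author's own statement) =====
-- stated objective: simpler
-- what changed: Replaces the incrementally maintained sliding window sum (seed + add/subtract updates and a separate first-window check) with a single loop over window end positions that recomputes each 5-day sum from a fresh slice and compares it to 75 (exact for integer temps).
import Mathlib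
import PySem

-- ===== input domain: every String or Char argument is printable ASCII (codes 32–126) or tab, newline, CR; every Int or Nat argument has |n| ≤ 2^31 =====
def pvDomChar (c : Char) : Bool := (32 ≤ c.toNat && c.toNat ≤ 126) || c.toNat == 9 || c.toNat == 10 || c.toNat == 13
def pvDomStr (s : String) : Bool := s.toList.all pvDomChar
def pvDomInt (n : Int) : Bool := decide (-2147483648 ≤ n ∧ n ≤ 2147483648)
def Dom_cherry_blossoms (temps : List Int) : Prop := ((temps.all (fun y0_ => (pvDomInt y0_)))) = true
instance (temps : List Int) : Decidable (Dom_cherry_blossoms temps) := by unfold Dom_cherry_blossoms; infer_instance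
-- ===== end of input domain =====

-- B recomputes each 5-day window sum from a fresh slice instead of maintaining A's sliding accumulator; objective: simpler.
-- Both ports compare the integer window sum with 75: for integer temps, Python's 'sum/5 > 15' is exactly 'sum > 75'.

-- ===== PORT A =====
-- A's sliding loop 'for i in range(5, n)' carrying the maintained window_sum.
def cbSlide (temps : List Int) (ws : Int) (i : Nat) : Int :=
  if _h : i < temps.length then
    let ws' := ws + temps.getD i 0 - temps.getD (i - 5) 0
    if ws' > 75 then (i : Int) + 1 else cbSlide temps ws' (i + 1)
  else -1
termination_by temps.length - i

def cherry_blossoms (temps : List Int) : Int :=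
  let n := temps.length
  if n < 5 then -1
  else
    let window_sum := (temps.take 5).sum   -- sum(temps[:5])
    if window_sum > 75 then 5              -- window_sum / 5 > 15, exact for ints
    else cbSlide temps window_sum 5

-- ===== PORT B =====
-- B's loop 'for end in range(4, n)', recomputing sum(temps[end-4:end+1]) each time.
def cbScan (temps : List Int) (e : Nat) : Int :=
  if _h : e < temps.length then
    if ((temps.drop (e - 4)).take 5).sum > 75 then (e : Int) + 1 else cbScan temps (e + 1)
  else -1
termination_by temps.length - e

def cherry_blossoms_alt (temps : List Int) : Int :=
  if temps.length < 5 then -1 else cbScan temps 4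

-- ===== PRECONDITION & SPEC =====
def Spec_cherry_blossoms (temps : List Int) (out : Int) : Prop := out = cherry_blossoms_alt temps
instance (temps : List Int) (out : Int) : Decidable (Spec_cherry_blossoms temps out) := by unfold Spec_cherry_blossoms; infer_instance

-- ===== CLAIM (what is proved, stated in full; the proofs are below) =====
def Claim_equal_cherry_blossoms : Prop := ∀ (temps : List Int), Dom_cherry_blossoms temps → Spec_cherry_blossoms temps (cherry_blossoms temps)

-- ===== LEMMAS AND PROOFS =====

-- Sliding identity: moving the 5-window one step right adds temps[k+5] and drops temps[k].
lemma slide_sum (temps : List Int) (k : Nat) (h : k + 5 < temps.length) :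
    ((temps.drop k).take 5).sum + temps.getD (k + 5) 0 - temps.getD k 0
      = ((temps.drop (k + 1)).take 5).sum := by
  have hd : temps.drop k = temps.getD k 0 :: temps.drop (k + 1) := by
    rw [List.drop_eq_getElem_cons (by omega)]
    simp [List.getD, List.getElem?_eq_getElem (by omega : k < temps.length)]
  have ht : (temps.drop (k + 1)).take 5
      = (temps.drop (k + 1)).take 4 ++ [temps.getD (k + 5) 0] := by
    rw [List.take_add_one]
    have : (temps.drop (k + 1))[4]? = some (temps.getD (k + 5) 0) := by
      rw [List.getElem?_drop]
      simp [List.getD, List.getElem?_eq_getElem (by omega : k + 1 + 4 < temps.length)]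
    simp [this]
  rw [hd, ht]
  simp [List.take_succ_cons, List.sum_append]
  ring

-- A's slide loop started at i = k+5 with the window sum ending at k+4 agrees with B's scan at e = k+5.
lemma slide_eq_scan (temps : List Int) (k : Nat) :
    cbSlide temps (((temps.drop k).take 5).sum) (k + 5) = cbScan temps (k + 5) := by
  by_cases h : k + 5 < temps.length
  · rw [cbSlide, cbScan]
    simp only [h, dif_pos]
    have e1 : k + 5 - 5 = k := by omega
    have e2 : k + 5 - 4 = k + 1 := by omega
    rw [e1, e2, slide_sum temps k h]
    split_ifs with hw
    · rfl
    · have := slide_eq_scan temps (k + 1)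
      simpa [Nat.add_right_comm k 1 5] using this
  · rw [cbSlide, cbScan]
    simp [h]
termination_by temps.length - k

-- ===== VERDICT (by name: the statement is the Claim_ definition above) =====
theorem cherry_blossoms_spec : Claim_equal_cherry_blossoms := by
  intro temps _
  unfold Spec_cherry_blossoms cherry_blossoms cherry_blossoms_alt
  by_cases hn : temps.length < 5
  · simp [hn]
  · simp only [hn, if_false]
    rw [cbScan]
    have h4 : 4 < temps.length := by omega
    simp only [h4, dif_pos]
    have h0 : (temps.drop (4 - 4)).take 5 = temps.take 5 := by norm_num
    rw [h0]
    split_ifs with hw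
    · rfl
    · have := slide_eq_scan temps 0
      simpa using this
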